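-- pv_equiv track=rewrite | github.com/nfeibel/Python | Number-and-Item-Processor/nfeibel_202_P3.py | biggest_combustible
-- ===== SOURCE A (Python) =====
-- def is_combustible(name, combustibles):
--
-- 	#Below we verify whether the combustibles list is empty and if so,
-- 	#confirm False.
-- 	if len(combustibles) == 0:
-- 		return False
--
-- 	#Below we use a for loop to go over the combustibles list.
-- 	for i in range(0,len(combustibles)):
--
-- 		#The if statement below verifies whether the combustible at
-- 		#index i is the name. True is returned if so.
-- 		if combustibles[i] == name:
-- 			return True
--
-- 	#If True has not been returned by now, we can return False
-- 	#since the combustibles list has been iterated through already.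
-- 	return False
--
-- def biggest_combustible(names, sizes, combustibles):
--
-- 	largest_combustible = 0
-- 	largest_index = 0
--
-- 	#Below we iterate over the list of names to verify combustibility.
-- 	for i in range(0, len(names)):
--
-- 		#The if statement below is used to confirm whether we are over the max
-- 		#index and if so, breaks the loop.
-- 		if i >= len(names) or i >= len(sizes):
-- 			break
--
-- 		#If the index is not over max, we then compare the combustible at
-- 		#index i with the largest combustible. If it is larger, we update
-- 		#the index of the largest combustible and the index of the largest
-- 		#combustible.
-- 		elif is_combustible(names[i], combustibles):
-- 			if largest_combustible < sizes[i]: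
-- 				largest_index = i
-- 				largest_combustible = sizes[i]
--
-- 	#If there was no combustible or no items in the list of combustibles or
-- 	#names, we confirm None below. Else, we confirm the name of the largest
-- 	#combustible.
-- 	if largest_combustible == 0:
-- 		return None
--
-- 	else:
-- 		return names[largest_index]
-- ===== SOURCE B (Python) =====
-- def biggest_combustible(names, sizes, combustibles):
--     cset = set(combustibles)
--     candidates = [(s, n) for n, s in zip(names, sizes) if n in cset and s > 0]
--     ranked = sorted(candidates, key=lambda t: t[0], reverse=True)
--     return ranked[0][1] if ranked else None
-- ===== Notes on version B (the rewrite author's own statement) =====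
-- stated objective: faster
-- what changed: Replaces A's single running-max loop with per-item linear membership scans by a staged pipeline: one zip+filter pass into a positive-size candidate list using a set for membership, a stable descending sort by size, and taking the head (stability gives first-index-wins on ties).
import Mathlib
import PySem

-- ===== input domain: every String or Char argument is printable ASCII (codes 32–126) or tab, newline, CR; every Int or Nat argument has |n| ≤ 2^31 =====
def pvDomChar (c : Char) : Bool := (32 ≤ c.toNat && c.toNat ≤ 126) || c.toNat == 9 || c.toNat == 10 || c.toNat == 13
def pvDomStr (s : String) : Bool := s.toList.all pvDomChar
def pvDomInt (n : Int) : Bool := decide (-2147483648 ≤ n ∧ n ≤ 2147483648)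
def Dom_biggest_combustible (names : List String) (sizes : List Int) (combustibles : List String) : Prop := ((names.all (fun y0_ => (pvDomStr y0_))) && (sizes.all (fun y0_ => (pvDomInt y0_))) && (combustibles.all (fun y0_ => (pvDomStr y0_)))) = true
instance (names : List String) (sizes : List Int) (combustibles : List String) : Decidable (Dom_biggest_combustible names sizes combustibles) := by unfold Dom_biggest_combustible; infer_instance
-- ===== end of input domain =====

-- B replaces A's running-max index loop (with a linear membership scan per item) by a staged
-- pipeline: set membership, one zip+filter pass into a candidate list, a stable descending sort
-- by size, head of the result; structurally different, same value.

-- ===== PORT A =====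
-- helper: literal port of is_combustible (early-return scan over indices)
def is_combustible (name : String) (combustibles : List String) : Bool :=
  if combustibles.length = 0 then false
  else (PySem.List.pyRange 0 (combustibles.length : Int) 1).any
        (fun i => PySem.List.pyGetD combustibles i "" == name)

-- the for-loop of A, with its break (i ≥ len sizes) and running (largest, largest_index) state
def bcLoop (names : List String) (sizes : List Int) (combustibles : List String)
    (i : Nat) (largest : Int) (li : Nat) : Int × Nat :=
  if i < names.length then
    if i ≥ sizes.length then (largest, li)
    else
      if is_combustible (PySem.List.pyGetD names (i : Int) "") combustibles then
        if largest < PySem.List.pyGetD sizes (i : Int) 0 then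
          bcLoop names sizes combustibles (i+1) (PySem.List.pyGetD sizes (i : Int) 0) i
        else bcLoop names sizes combustibles (i+1) largest li
      else bcLoop names sizes combustibles (i+1) largest li
  else (largest, li)
termination_by names.length - i

def biggest_combustible (names : List String) (sizes : List Int) (combustibles : List String) : Option String :=
  let r := bcLoop names sizes combustibles 0 0 0
  if r.1 = 0 then none else some (PySem.List.pyGetD names (r.2 : Int) "")

-- ===== PORT B =====
def biggest_combustible_alt (names : List String) (sizes : List Int) (combustibles : List String) : Option String :=
  let cset := PySem.Set.ofList combustibles
  let candidates := ((names.zip sizes).filter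
      (fun p => decide (p.1 ∈ cset) && decide (0 < p.2))).map (fun p => (p.2, p.1))
  let ranked := PySem.List.sorted candidates (fun t => t.1) true
  match ranked with
  | b :: _ => some b.2
  | [] => none

-- ===== PRECONDITION & SPEC =====
def Spec_biggest_combustible (names : List String) (sizes : List Int) (combustibles : List String) (out : Option String) : Prop := out = biggest_combustible_alt names sizes combustibles
instance (names : List String) (sizes : List Int) (combustibles : List String) (out : Option String) : Decidable (Spec_biggest_combustible names sizes combustibles out) := by unfold Spec_biggest_combustible; infer_instance

-- ===== CLAIM (what is proved, stated in full; the proofs are below) =====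
def Claim_equal_biggest_combustible : Prop := ∀ (names : List String) (sizes : List Int) (combustibles : List String), Dom_biggest_combustible names sizes combustibles → Spec_biggest_combustible names sizes combustibles (biggest_combustible names sizes combustibles)

-- ===== LEMMAS AND PROOFS =====

-- is_combustible is membership
theorem is_combustible_eq (name : String) (c : List String) :
    is_combustible name c = c.contains name := by
  unfold is_combustible
  by_cases h : c.length = 0
  · simp [List.length_eq_zero_iff.mp h]
  · have hmap := PySem.List.map_pyGetD_pyRange_zero' c ""
    simp only [h, if_false]
    conv_lhs => rw [show (fun i => PySem.List.pyGetD c i "" == name)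
      = ((· == name) ∘ fun j => PySem.List.pyGetD c j "") from rfl]
    rw [← List.any_map, hmap]
    exact List.any_beq'

-- the candidate list of a (name, size) list
def cands (comb : List String) (zs : List (String × Int)) : List (Int × String) :=
  (zs.filter (fun p => decide (p.1 ∈ comb) && decide (0 < p.2))).map (fun p => (p.2, p.1))

-- the "first maximal candidate" step (semantic description shared by both sides)
def mstep (acc : Option (Int × String)) (x : Int × String) : Option (Int × String) :=
  match acc with
  | none => some x
  | some m => if m.1 < x.1 then some x else some m

-- head of one stable descending insertion = mstep on heads
theorem head?_insertBy (x : Int × String) (acc : List (Int × String)) :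
    (PySem.List.insertBy (fun a b => decide (b.1 < a.1)) x acc).head? = mstep acc.head? x := by
  cases acc with
  | nil => simp [PySem.List.insertBy, mstep]
  | cons m t =>
    simp only [PySem.List.insertBy, mstep]
    by_cases h : m.1 < x.1 <;> simp [h]

-- head of the stable reverse insertion sort = the running first-maximal fold
theorem head?_sorted_rev (cs : List (Int × String)) :
    (PySem.List.sorted cs (fun t => t.1) true).head? = cs.foldl mstep none := by
  rw [PySem.List.sorted_rev_eq_foldl_insertBy]
  suffices h : ∀ (cs : List (Int × String)) (acc : List (Int × String)),
      (cs.foldl (fun acc x => PySem.List.insertBy (fun a b => decide ((fun t => t.1) b < (fun t => t.1) a)) x acc) acc).head?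
        = cs.foldl mstep acc.head? by
    exact h cs []
  intro cs
  induction cs with
  | nil => intro acc; rfl
  | cons x t ih =>
    intro acc
    simp only [List.foldl_cons]
    rw [ih, head?_insertBy]

theorem foldl_mstep_cands_cons (comb : List String) (p : String × Int) (zs : List (String × Int))
    (st : Option (Int × String)) :
    (cands comb (p :: zs)).foldl mstep st =
      if decide (p.1 ∈ comb) && decide (0 < p.2)
      then (cands comb zs).foldl mstep (mstep st (p.2, p.1))
      else (cands comb zs).foldl mstep st := by
  unfold cands
  by_cases h : (decide (p.1 ∈ comb) && decide (0 < p.2)) = true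
  · simp [h]
  · simp only [List.filter_cons, h]
    simp at h
    simp

-- the abstraction relation between A's (largest, index) state and B's optional best candidate
def absSt (names : List String) (a : Int) (b : Nat) (st : Option (Int × String)) : Prop :=
  (a = 0 ∧ st = none) ∨
  (0 < a ∧ ∃ h : b < names.length, st = some (a, names[b]))

theorem bcLoop_abs (names : List String) (sizes : List Int) (comb : List String) :
    ∀ k i a b st, names.length ≤ i + k → absSt names a b st →
      absSt names (bcLoop names sizes comb i a b).1 (bcLoop names sizes comb i a b).2
        ((cands comb ((names.zip sizes).drop i)).foldl mstep st) := by
  intro k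
  induction k with
  | zero =>
    intro i a b st hk hst
    have hi : ¬ i < names.length := by omega
    have hdrop : (names.zip sizes).drop i = [] := by
      apply List.drop_eq_nil_of_le
      simp [List.length_zip]; omega
    rw [bcLoop]
    simp [hi, hdrop, cands, hst]
  | succ k ih =>
    intro i a b st hk hst
    rw [bcLoop]
    by_cases hi : i < names.length
    · by_cases hs : i ≥ sizes.length
      · have hdrop : (names.zip sizes).drop i = [] := by
          apply List.drop_eq_nil_of_le
          simp [List.length_zip]; omega
        simp [hi, hs, hdrop, cands, hst]
      · have hs' : i < sizes.length := by omega
        have hzlen : i < (names.zip sizes).length := by simp [List.length_zip]; omega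
        have hdrop : (names.zip sizes).drop i = (names[i], sizes[i]) :: (names.zip sizes).drop (i+1) := by
          rw [List.drop_eq_getElem_cons hzlen]
          simp
        have hgn : PySem.List.pyGetD names (i : Int) "" = names[i] := by
          rw [PySem.List.pyGetD_natCast]
          simp [hi]
        have hgs : PySem.List.pyGetD sizes (i : Int) 0 = sizes[i] := by
          rw [PySem.List.pyGetD_natCast]
          simp [hs']
        have ha0 : 0 ≤ a := by
          rcases hst with ⟨h1, _⟩ | ⟨h1, _⟩ <;> omega
        rw [hdrop, foldl_mstep_cands_cons]
        by_cases hc : is_combustible names[i] comb = true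
        · have hmem : names[i] ∈ comb := by
            have hh := is_combustible_eq names[i] comb
            rw [hc] at hh
            simpa using hh.symm
          by_cases hlt : a < sizes[i]
          · -- update
            have hpos : 0 < sizes[i] := by omega
            simp only [hi, if_true, hs, if_false, hgn, hgs, hc, hlt]
            simp only [hmem, hpos, decide_true, Bool.and_self, if_true]
            have hstep : mstep st (sizes[i], names[i]) = some (sizes[i], names[i]) := by
              rcases hst with ⟨h1, h2⟩ | ⟨h1, h2, h3⟩
              · simp [h2, mstep]
              · simp [h3, mstep, hlt]
            rw [hstep]
            exact ih (i+1) sizes[i] i (some (sizes[i], names[i])) (by omega)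
              (Or.inr ⟨hpos, hi, rfl⟩)
          · -- keep
            have hkeep : (if decide (names[i] ∈ comb) && decide (0 < sizes[i])
                then (cands comb ((names.zip sizes).drop (i+1))).foldl mstep (mstep st (sizes[i], names[i]))
                else (cands comb ((names.zip sizes).drop (i+1))).foldl mstep st)
                = (cands comb ((names.zip sizes).drop (i+1))).foldl mstep st := by
              by_cases hpos : 0 < sizes[i]
              · have hane : 0 < a := by omega
                rcases hst with ⟨h1, _⟩ | ⟨h1, h2, h3⟩
                · omega
                · have hm : mstep st (sizes[i], names[i]) = st := by
                    simp only [h3, mstep]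
                    rw [if_neg hlt]
                  simp [hm]
              · simp [hpos]
            simp only [hi, if_true, hs, if_false, hgn, hgs, hc, hlt, if_false]
            rw [hkeep]
            exact ih (i+1) a b st (by omega) hst
        · -- not combustible: no candidate, state kept
          have hmem : names[i] ∉ comb := by
            intro hm
            apply hc
            rw [is_combustible_eq]
            simpa using hm
          simp only [hi, if_true, hs, if_false, hgn, hc, if_false]
          simp only [hmem, decide_false, Bool.false_and]
          exact ih (i+1) a b st (by omega) hst
    · have hdrop : (names.zip sizes).drop i = [] := by
        apply List.drop_eq_nil_of_le
        simp [List.length_zip]; omega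
      simp [hi, hdrop, cands, hst]

-- ===== VERDICT (by name: the statement is the Claim_ definition above) =====
theorem biggest_combustible_spec : Claim_equal_biggest_combustible := by
  intro names sizes comb _
  unfold Spec_biggest_combustible biggest_combustible biggest_combustible_alt
  have h := bcLoop_abs names sizes comb names.length 0 0 0 none (by omega) (Or.inl ⟨rfl, rfl⟩)
  simp only [List.drop_zero] at h
  have hcand : ((names.zip sizes).filter
      (fun p => decide (p.1 ∈ PySem.Set.ofList comb) && decide (0 < p.2))).map (fun p => (p.2, p.1))
      = cands comb (names.zip sizes) := by
    unfold cands
    congr 1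
    apply List.filter_congr
    intro p _
    simp [PySem.Set.mem_ofList]
  have hhead := head?_sorted_rev (cands comb (names.zip sizes))
  simp only [hcand]
  rcases h with ⟨h1, h2⟩ | ⟨h1, h2, h3⟩
  · rw [h2] at hhead
    rw [h1]
    simp only [reduceIte]
    cases hsort : PySem.List.sorted (cands comb (names.zip sizes)) (fun t => t.1) true with
    | nil => rfl
    | cons b t => rw [hsort] at hhead; simp at hhead
  · have hne : (bcLoop names sizes comb 0 0 0).1 ≠ 0 := by omega
    rw [h3] at hhead
    simp only [hne, if_false]
    have hg : PySem.List.pyGetD names ((bcLoop names sizes comb 0 0 0).2 : Int) ""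
        = names[(bcLoop names sizes comb 0 0 0).2] := by
      rw [PySem.List.pyGetD_natCast]
      simp [h2]
    rw [hg]
    cases hsort : PySem.List.sorted (cands comb (names.zip sizes)) (fun t => t.1) true with
    | nil => rw [hsort] at hhead; simp at hhead
    | cons b t =>
      rw [hsort] at hhead
      simp only [List.head?_cons] at hhead
      rw [Option.some.inj hhead]
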